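-- pv_equiv track=rewrite | github.com/skybridgecx-code/polymarket | src/future_system/review_exports/builder.py | _normalize_supported_cryp_asset
-- ===== SOURCE A (Python) =====
-- _SUPPORTED_CRYP_SIGNAL_ASSETS = ("BTC", "ETH", "SOL", "XRP")
--
-- def _normalize_supported_cryp_asset(symbol: str | None) -> str | None:
--     if symbol is None:
--         return None
--
--     normalized = symbol.strip().upper()
--     if not normalized:
--         return None
--
--     for asset in _SUPPORTED_CRYP_SIGNAL_ASSETS:
--         if normalized == asset:
--             return asset
--         if normalized.startswith(f"{asset}-"):
--             return asset
--         if normalized in {f"{asset}USD", f"{asset}USDT"}: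
--             return asset
--     return None
-- ===== SOURCE B (Python) =====
-- _SUPPORTED_CRYP_SIGNAL_ASSETS = ("BTC", "ETH", "SOL", "XRP")
--
-- def _normalize_supported_cryp_asset(symbol):
--     if symbol is None:
--         return None
--     normalized = symbol.strip().upper()
--     if not normalized:
--         return None
--     i = normalized.find('-')
--     if i >= 0:
--         base = normalized[:i]
--     elif normalized.endswith('USDT'):
--         base = normalized[:len(normalized) - 4]
--     elif normalized.endswith('USD'):
--         base = normalized[:len(normalized) - 3]
--     else:
--         base = normalized
--     return base if base in _SUPPORTED_CRYP_SIGNAL_ASSETS else None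
-- ===== Notes on version B (the rewrite author's own statement) =====
-- stated objective: simpler
-- what changed: B replaces A's per-asset scan (each asset tested for equality, 'ASSET-' prefix and ASSETUSD/ASSETUSDT forms) by a parse-once-then-lookup structure: derive one candidate base (text before the first '-', else strip a USDT/USD suffix, else the whole string) and return it iff it is a supported asset.
import Mathlib
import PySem

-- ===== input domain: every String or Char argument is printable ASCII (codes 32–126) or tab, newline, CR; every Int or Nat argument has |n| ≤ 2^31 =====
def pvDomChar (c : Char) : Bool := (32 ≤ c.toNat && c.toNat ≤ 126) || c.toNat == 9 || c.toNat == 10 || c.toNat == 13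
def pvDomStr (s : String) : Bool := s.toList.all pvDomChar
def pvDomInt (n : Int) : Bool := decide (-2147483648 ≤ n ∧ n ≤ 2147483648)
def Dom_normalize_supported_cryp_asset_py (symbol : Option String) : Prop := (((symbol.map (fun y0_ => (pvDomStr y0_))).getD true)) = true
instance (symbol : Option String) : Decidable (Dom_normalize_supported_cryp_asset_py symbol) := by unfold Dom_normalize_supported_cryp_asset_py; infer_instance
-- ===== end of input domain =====

-- B is a simpler decomposition: instead of A's per-asset scan, B parses out one candidate
-- base (text before the first '-', else strip a 'USDT'/'USD' suffix) and looks it up once.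

-- ===== PORT A =====
-- _SUPPORTED_CRYP_SIGNAL_ASSETS = ("BTC", "ETH", "SOL", "XRP")
def pvAssets : List (List Char) :=
  [['B','T','C'], ['E','T','H'], ['S','O','L'], ['X','R','P']]

-- the `for asset in _SUPPORTED_CRYP_SIGNAL_ASSETS` loop of A, with its three checks in order
def pvALoop : List (List Char) → List Char → Option (List Char)
  | [], _ => none
  | a :: rest, n =>
    if n = a then some a
    else if PySem.Chars.startswith n (a ++ ['-']) then some a
    else if n = a ++ ['U','S','D'] ∨ n = a ++ ['U','S','D','T'] then some a
    else pvALoop rest n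

def normalize_supported_cryp_asset_py (symbol : Option String) : Option String :=
  match symbol with
  | none => none
  | some s =>
    let normalized := (PySem.Str.upper (PySem.Str.strip s)).toList
    if normalized = [] then none
    else (pvALoop pvAssets normalized).map String.ofList

-- ===== PORT B =====
-- B's candidate base: text before the first '-' if any, else strip 'USDT'/'USD', else the string
def pvBBase (n : List Char) : List Char :=
  let i := PySem.Chars.find n ['-']
  if 0 ≤ i then PySem.List.slice n none (some i)
  else if PySem.Chars.endswith n ['U','S','D','T'] then
    PySem.List.slice n none (some ((n.length : Int) - 4))
  else if PySem.Chars.endswith n ['U','S','D'] then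
    PySem.List.slice n none (some ((n.length : Int) - 3))
  else n

def normalize_supported_cryp_asset_py_alt (symbol : Option String) : Option String :=
  match symbol with
  | none => none
  | some s =>
    let normalized := (PySem.Str.upper (PySem.Str.strip s)).toList
    if normalized = [] then none
    else
      let base := pvBBase normalized
      if pvAssets.contains base then some (String.ofList base) else none

-- ===== PRECONDITION & SPEC =====
def Spec_normalize_supported_cryp_asset_py (symbol : Option String) (out : Option String) : Prop := out = normalize_supported_cryp_asset_py_alt symbol
instance (symbol : Option String) (out : Option String) : Decidable (Spec_normalize_supported_cryp_asset_py symbol out) := by unfold Spec_normalize_supported_cryp_asset_py; infer_instance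

-- ===== CLAIM (what is proved, stated in full; the proofs are below) =====
def Claim_equal_normalize_supported_cryp_asset_py : Prop := ∀ (symbol : Option String), Dom_normalize_supported_cryp_asset_py symbol → Spec_normalize_supported_cryp_asset_py symbol (normalize_supported_cryp_asset_py symbol)

-- ===== LEMMAS AND PROOFS =====

-- a ++ [c] is a prefix of p ++ c :: r iff a = p, when neither a nor p contains c
theorem pv_prefix_dash {c : Char} : ∀ (p a r : List Char), c ∉ a → c ∉ p →
    (a ++ [c] <+: p ++ c :: r ↔ a = p) := by
  intro p
  induction p with
  | nil =>
    intro a r ha _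
    cases a with
    | nil => simp
    | cons hd tl =>
      simp only [List.cons_append, List.nil_append, List.cons_prefix_cons]
      constructor
      · rintro ⟨rfl, -⟩; exact absurd (List.mem_cons_self ..) ha
      · intro h; exact absurd h (by simp)
  | cons q ps ih =>
    intro a r ha hp
    cases a with
    | nil =>
      simp only [List.nil_append, List.cons_append, List.cons_prefix_cons]
      constructor
      · rintro ⟨rfl, -⟩; exact absurd (List.mem_cons_self ..) hp
      · intro h; exact absurd h (by simp)
    | cons hd tl =>
      simp only [List.cons_append, List.cons_prefix_cons]
      have ha' : c ∉ tl := fun h => ha (List.mem_cons_of_mem _ h)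
      have hp' : c ∉ ps := fun h => hp (List.mem_cons_of_mem _ h)
      rw [ih tl r ha' hp']
      constructor
      · rintro ⟨rfl, rfl⟩; rfl
      · intro h; cases h; exact ⟨rfl, rfl⟩

theorem pv_singleton_infix_of_mem {c : Char} {n : List Char} (h : c ∈ n) : [c] <:+: n := by
  obtain ⟨s, t, rfl⟩ := List.append_of_mem h
  exact ⟨s, t, by simp⟩

-- decomposition of n at the first '-' when find succeeds
theorem pv_dash_decomp (n : List Char) (h : 0 ≤ PySem.Chars.find n ['-']) :
    n = n.take (PySem.Chars.find n ['-']).toNat ++ '-' :: n.drop ((PySem.Chars.find n ['-']).toNat + 1)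
    ∧ ('-' : Char) ∉ n.take (PySem.Chars.find n ['-']).toNat := by
  obtain ⟨hpre, hmin⟩ := PySem.Chars.find_spec h
  set i := (PySem.Chars.find n ['-']).toNat with hi
  obtain ⟨t, ht⟩ := hpre
  have hdrop : n.drop i = '-' :: t := by simpa using ht.symm
  have hlen : i < n.length := by
    by_contra hc
    rw [List.drop_eq_nil_of_le (by omega)] at hdrop
    exact absurd hdrop (by simp)
  constructor
  · have h1 : n.drop (i + 1) = t := by
      rw [← List.tail_drop, hdrop, List.tail_cons]
    rw [h1, ← hdrop, List.take_append_drop]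
  · intro hm
    rw [List.mem_take_iff_getElem] at hm
    obtain ⟨j, hj, he⟩ := hm
    have hj' : j < n.length := by omega
    have hjlt : j < i := by omega
    refine hmin j hjlt ⟨n.drop (j+1), ?_⟩
    rw [List.drop_eq_getElem_cons hj', he]
    rfl

-- for a supported asset a, A's three checks succeed exactly when B's candidate base is a
theorem pv_per_asset (n a : List Char) (hd : ('-' : Char) ∉ a) (hl : a.length = 3)
    (hu : a ≠ ['U','S','D']) :
    ((n = a) ∨ (PySem.Chars.startswith n (a ++ ['-']) = true)
      ∨ n = a ++ ['U','S','D'] ∨ n = a ++ ['U','S','D','T']) ↔ pvBBase n = a := by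
  by_cases hf : 0 ≤ PySem.Chars.find n ['-']
  · -- n contains a dash
    obtain ⟨hdec, hnp⟩ := pv_dash_decomp n hf
    set i := (PySem.Chars.find n ['-']).toNat with hi
    have hBase : pvBBase n = n.take i := by
      unfold pvBBase
      rw [if_pos hf, PySem.List.slice_to n hf]
    have hcn : ('-' : Char) ∈ n := by rw [hdec]; simp
    constructor
    · rintro (rfl | h | rfl | rfl)
      · exact absurd hcn hd
      · rw [hBase]
        have hpf := (PySem.Chars.startswith_iff n _).mp h
        rw [hdec] at hpf
        exact ((pv_prefix_dash _ a _ hd hnp).mp hpf).symm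
      · simp only [List.mem_append, List.mem_cons, List.not_mem_nil] at hcn
        rcases hcn with h1 | h1
        · exact absurd h1 hd
        · simp at h1
      · simp only [List.mem_append, List.mem_cons, List.not_mem_nil] at hcn
        rcases hcn with h1 | h1
        · exact absurd h1 hd
        · simp at h1
    · intro hb
      rw [hBase] at hb
      right; left
      rw [PySem.Chars.startswith_iff]
      rw [hdec]
      exact (pv_prefix_dash _ a _ hd (hb ▸ hnp)).mpr hb.symm
  · -- no dash in n
    have hfi : PySem.Chars.find n ['-'] = -1 := by
      have := PySem.Chars.neg_one_le_find n ['-']; omega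
    have hnotin : ('-' : Char) ∉ n := fun hm =>
      (PySem.Chars.find_eq_neg_one_iff n _).mp hfi (pv_singleton_infix_of_mem hm)
    have hsw : ¬ PySem.Chars.startswith n (a ++ ['-']) = true := by
      intro h
      exact hnotin (((PySem.Chars.startswith_iff n _).mp h).subset (by simp))
    by_cases h4 : PySem.Chars.endswith n ['U','S','D','T'] = true
    · -- n ends with USDT
      obtain ⟨pre, hpre⟩ : ∃ pre, n = pre ++ ['U','S','D','T'] := by
        obtain ⟨t, ht⟩ := (PySem.Chars.endswith_iff n _).mp h4
        exact ⟨t, ht.symm⟩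
      have hBase : pvBBase n = pre := by
        unfold pvBBase
        rw [if_neg hf, if_pos h4]
        have hln : ((n.length : Int) - 4) = ((pre.length : Nat) : Int) := by
          rw [hpre]
          simp only [List.length_append, List.length_cons, List.length_nil]
          push_cast
          omega
        rw [hln, PySem.List.slice_to_natCast, hpre]
        exact List.take_left
      rw [hBase]
      constructor
      · rintro (rfl | h | h | h)
        · exfalso
          have hlen1 := congrArg List.length hpre
          simp only [List.length_append, List.length_cons, List.length_nil] at hlen1
          omega
        · exact absurd h hsw
        · rw [hpre] at h
          have := congrArg List.reverse h
          simp [List.reverse_append] at this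
        · rw [hpre] at h
          exact (List.append_left_inj _).mp h
      · rintro rfl
        right; right; right
        rw [hpre]
    · by_cases h3 : PySem.Chars.endswith n ['U','S','D'] = true
      · -- n ends with USD (not USDT)
        obtain ⟨pre, hpre⟩ : ∃ pre, n = pre ++ ['U','S','D'] := by
          obtain ⟨t, ht⟩ := (PySem.Chars.endswith_iff n _).mp h3
          exact ⟨t, ht.symm⟩
        have hBase : pvBBase n = pre := by
          unfold pvBBase
          rw [if_neg hf, if_neg h4, if_pos h3]
          have hln : ((n.length : Int) - 3) = ((pre.length : Nat) : Int) := by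
            rw [hpre]
            simp only [List.length_append, List.length_cons, List.length_nil]
            push_cast
            omega
          rw [hln, PySem.List.slice_to_natCast, hpre]
          exact List.take_left
        rw [hBase]
        constructor
        · rintro (rfl | h | h | h)
          · -- pre ++ USD = a forces pre = [] and a = USD, contradicting hu
            exfalso
            have hlen1 := congrArg List.length hpre
            simp only [List.length_append, List.length_cons, List.length_nil] at hlen1
            have hpre0 : pre = [] := List.eq_nil_of_length_eq_zero (by omega)
            subst hpre0
            simp only [List.nil_append] at hpre
            exact hu hpre
          · exact absurd h hsw
          · rw [hpre] at h
            exact (List.append_left_inj _).mp h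
          · exact absurd ((PySem.Chars.endswith_iff n _).mpr ⟨a, h.symm⟩) h4
        · rintro rfl
          right; right; left
          rw [hpre]
      · -- no dash, no USD/USDT suffix
        have hBase : pvBBase n = n := by
          unfold pvBBase
          rw [if_neg hf, if_neg h4, if_neg h3]
        rw [hBase]
        constructor
        · rintro (rfl | h | h | h)
          · rfl
          · exact absurd h hsw
          · exact absurd ((PySem.Chars.endswith_iff n _).mpr ⟨a, h.symm⟩) h3
          · exact absurd ((PySem.Chars.endswith_iff n _).mpr ⟨a, h.symm⟩) h4
        · rintro rfl
          left; rfl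

theorem pv_loop (n : List Char) : ∀ (assets : List (List Char)),
    (∀ a ∈ assets, ((n = a) ∨ (PySem.Chars.startswith n (a ++ ['-']) = true)
        ∨ n = a ++ ['U','S','D'] ∨ n = a ++ ['U','S','D','T']) ↔ pvBBase n = a) →
    pvALoop assets n = (if assets.contains (pvBBase n) then some (pvBBase n) else none) := by
  intro assets
  induction assets with
  | nil => intro _; rfl
  | cons a rest ih =>
    intro h
    have ha := h a (List.mem_cons_self ..)
    by_cases hb : pvBBase n = a
    · have hdis := ha.mpr hb
      have hrhs : ((a :: rest).contains (pvBBase n)) = true := by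
        simp [hb]
      rw [hrhs, if_pos rfl]
      simp only [pvALoop]
      split_ifs with h1 h2 h3
      · rw [hb]
      · rw [hb]
      · rw [hb]
      · tauto
    · have h1 : ¬ n = a := fun hh => hb (ha.mp (Or.inl hh))
      have h2 : ¬ PySem.Chars.startswith n (a ++ ['-']) = true :=
        fun hh => hb (ha.mp (Or.inr (Or.inl hh)))
      have h3 : ¬ (n = a ++ ['U','S','D'] ∨ n = a ++ ['U','S','D','T']) :=
        fun hh => hb (ha.mp (Or.inr (Or.inr hh)))
      simp only [pvALoop]
      rw [if_neg h1, if_neg h2, if_neg h3,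
        ih (fun x hx => h x (List.mem_cons_of_mem _ hx))]
      have hceq : ((a :: rest).contains (pvBBase n)) = (rest.contains (pvBBase n)) := by
        rw [List.contains_cons, beq_eq_false_iff_ne.mpr hb, Bool.false_or]
      rw [hceq]

theorem pv_core (n : List Char) :
    pvALoop pvAssets n = (if pvAssets.contains (pvBBase n) then some (pvBBase n) else none) := by
  apply pv_loop
  intro a ha
  simp only [pvAssets, List.mem_cons, List.not_mem_nil, or_false] at ha
  rcases ha with rfl | rfl | rfl | rfl <;>
    exact pv_per_asset n _ (by decide) (by decide) (by decide)

-- ===== VERDICT (by name: the statement is the Claim_ definition above) =====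
theorem normalize_supported_cryp_asset_py_spec : Claim_equal_normalize_supported_cryp_asset_py := by
  intro symbol _
  unfold Spec_normalize_supported_cryp_asset_py normalize_supported_cryp_asset_py normalize_supported_cryp_asset_py_alt
  match symbol with
  | none => rfl
  | some s =>
    simp only []
    split
    · rfl
    · rw [pv_core]
      split <;> simp
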